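-- pv_equiv track=rewrite | github.com/oomer/oomerfarm-flamenco | python/gui_bella.py | _summarize_error
-- ===== SOURCE A (Python) =====
-- _ERROR_NEEDLES = (
--     "ERROR:",
--     "TLS (mTLS)",
--     "TLS:",
--     "TLS handshake",
--     "DNS:",
--     "Network timeout",
--     "Connection refused",
--     "HTTP request failed",
--     "Missing BSZ file",
--     "Traceback (most recent call last):",
-- )
--
-- def _summarize_error(output: str) -> str:
--     for line in reversed(output.splitlines()):
--         s = line.strip()
--         if not s:
--             continue
--         for needle in _ERROR_NEEDLES:
--             if needle in s:
--                 return s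
--     for line in reversed(output.splitlines()):
--         s = line.strip()
--         if s:
--             return s
--     return "(no error text captured)"
-- ===== SOURCE B (Python) =====
-- _ERROR_NEEDLES = (
--     "ERROR:",
--     "TLS (mTLS)",
--     "TLS:",
--     "TLS handshake",
--     "DNS:",
--     "Network timeout",
--     "Connection refused",
--     "HTTP request failed",
--     "Missing BSZ file",
--     "Traceback (most recent call last):",
-- )
--
-- def _summarize_error(output: str) -> str:
--     fallback = None
--     for line in reversed(output.splitlines()):
--         s = line.strip()
--         if not s:
--             continue
--         if any(n in s for n in _ERROR_NEEDLES):
--             return s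
--         if fallback is None:
--             fallback = s
--     return fallback if fallback is not None else "(no error text captured)"
-- ===== Notes on version B (the rewrite author's own statement) =====
-- stated objective: simpler
-- what changed: Single reverse pass that returns a needle-matching line immediately and records the first non-empty stripped line as a fallback, replacing A's two separate reverse scans over the split lines.
import Mathlib
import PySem

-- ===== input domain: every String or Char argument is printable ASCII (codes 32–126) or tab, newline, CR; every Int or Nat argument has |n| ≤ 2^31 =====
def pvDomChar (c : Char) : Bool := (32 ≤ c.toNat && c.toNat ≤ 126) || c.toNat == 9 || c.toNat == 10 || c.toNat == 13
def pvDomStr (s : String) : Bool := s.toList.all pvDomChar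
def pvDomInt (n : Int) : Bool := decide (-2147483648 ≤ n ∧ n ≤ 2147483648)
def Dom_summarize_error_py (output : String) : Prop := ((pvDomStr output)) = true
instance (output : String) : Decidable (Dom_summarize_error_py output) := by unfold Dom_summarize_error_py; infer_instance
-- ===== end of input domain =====

-- B merges A's two reverse scans into a single reverse pass with a fallback accumulator (objective: simpler).

-- ===== PORT A =====
def pvNeedles : List String :=
  ["ERROR:", "TLS (mTLS)", "TLS:", "TLS handshake", "DNS:", "Network timeout",
   "Connection refused", "HTTP request failed", "Missing BSZ file",
   "Traceback (most recent call last):"]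

-- first loop of A: first line from the end whose strip is non-empty and contains a needle
def pvFindErr : List String → Option String
  | [] => none
  | line :: rest =>
      let s := PySem.Str.strip line
      if s = "" then pvFindErr rest
      else if pvNeedles.any (fun n => PySem.Str.isIn n s) then some s
      else pvFindErr rest

-- second loop of A: first line from the end whose strip is non-empty
def pvFindNonempty : List String → Option String
  | [] => none
  | line :: rest =>
      let s := PySem.Str.strip line
      if s = "" then pvFindNonempty rest else some s

def summarize_error_py (output : String) : String :=
  let rev := (PySem.Str.splitlines output).reverse
  match pvFindErr rev with
  | some s => s
  | none =>
    match pvFindNonempty rev with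
    | some s => s
    | none => "(no error text captured)"

-- ===== PORT B =====
def pvScan : List String → Option String → String
  | [], fb => fb.getD "(no error text captured)"
  | line :: rest, fb =>
      let s := PySem.Str.strip line
      if s = "" then pvScan rest fb
      else if pvNeedles.any (fun n => PySem.Str.isIn n s) then s
      else pvScan rest (if fb.isSome then fb else some s)

def summarize_error_py_alt (output : String) : String :=
  pvScan (PySem.Str.splitlines output).reverse none

-- ===== PRECONDITION & SPEC =====
def Spec_summarize_error_py (output : String) (out : String) : Prop := out = summarize_error_py_alt output
instance (output : String) (out : String) : Decidable (Spec_summarize_error_py output out) := by unfold Spec_summarize_error_py; infer_instance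

-- ===== CLAIM (what is proved, stated in full; the proofs are below) =====
def Claim_equal_summarize_error_py : Prop := ∀ (output : String), Dom_summarize_error_py output → Spec_summarize_error_py output (summarize_error_py output)

-- ===== LEMMAS AND PROOFS =====
theorem pvScan_eq (l : List String) (fb : Option String) :
    pvScan l fb =
      match pvFindErr l with
      | some s => s
      | none =>
        match fb with
        | some f => f
        | none =>
          match pvFindNonempty l with
          | some s => s
          | none => "(no error text captured)" := by
  induction l generalizing fb with
  | nil => cases fb <;> rfl
  | cons line rest ih =>
    simp only [pvScan, pvFindErr, pvFindNonempty]
    split_ifs with h hn hfb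
    · exact ih fb
    · rfl
    · rw [ih]
      obtain ⟨f, rfl⟩ := Option.isSome_iff_exists.mp hfb
      cases pvFindErr rest <;> rfl
    · rw [ih]
      cases fb with
      | some f => exact absurd rfl hfb
      | none => cases pvFindErr rest <;> rfl

-- ===== VERDICT (by name: the statement is the Claim_ definition above) =====
theorem summarize_error_py_spec : Claim_equal_summarize_error_py := by
  intro output _
  unfold Spec_summarize_error_py summarize_error_py summarize_error_py_alt
  rw [pvScan_eq]
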